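-- pv_equiv track=rewrite | github.com/Yawn-Sean/Daily_CF_Problems | daily_problems/2025/04/0424/personal_submission/cf1468d_liryc.py | solve
-- ===== SOURCE A (Python) =====
-- def solve(n: int, m: int, a: int, b: int, s: list[int]) -> int:
--     k, t = 0, 0
--     if a < b:
--         k, t = b - a - 1, a - 1
--     else:
--         k, t = a - b - 1, n - a
--     if k == 0:
--         return 0
--     s.sort()
--     ans = 0
--     for x in s[::-1]:
--         if x <= k + t:
--             ans += 1
--             k -= 1
--             if k == 0:
--                 break
--     return ans
-- ===== SOURCE B (Python) =====
-- def solve(n: int, m: int, a: int, b: int, s: list[int]) -> int: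
--     k = b - a - 1 if a < b else a - b - 1
--     t = a - 1 if a < b else n - a
--     if k == 0:
--         return 0
--     s.sort()
--     ans = j = 0  # j = thresholds t+1..t+j already unusable (consumed or too small)
--     for x in s:
--         j = max(j, x - t - 1)
--         if j < k:
--             ans += 1
--             j += 1
--     return ans
-- ===== Notes on version B (the rewrite author's own statement) =====
-- stated objective: alternative
-- what changed: A scans the sorted seats in descending order against a single threshold k+t that shrinks only on a match and breaks early; B folds over them once in ascending order with a pointer j over the fixed thresholds t+1..t+k, matching each seat to the smallest threshold still large enough.
-- outside the precondition, e.g. on solve(5, 2, 3, 3, [1, 1]): A returns 1, B returns 0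
import Mathlib
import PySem

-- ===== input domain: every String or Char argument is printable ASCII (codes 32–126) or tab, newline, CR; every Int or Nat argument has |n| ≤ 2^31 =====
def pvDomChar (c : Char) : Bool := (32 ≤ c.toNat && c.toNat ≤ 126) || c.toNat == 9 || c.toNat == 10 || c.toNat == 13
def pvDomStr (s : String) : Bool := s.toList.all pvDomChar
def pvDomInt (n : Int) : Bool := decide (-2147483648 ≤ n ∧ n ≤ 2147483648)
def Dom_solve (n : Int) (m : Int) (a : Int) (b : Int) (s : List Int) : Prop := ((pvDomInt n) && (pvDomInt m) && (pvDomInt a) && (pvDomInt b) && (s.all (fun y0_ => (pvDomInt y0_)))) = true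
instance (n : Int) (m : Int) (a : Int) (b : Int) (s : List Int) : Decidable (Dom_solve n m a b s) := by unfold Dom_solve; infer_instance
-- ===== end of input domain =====

-- B replaces A's descending scan with a shrinking threshold (and early break) by a single
-- ascending fold matching each seat against the fixed thresholds t+1..t+k via a pointer
-- (objective: alternative). Both A and B sort the argument list s in place; the equivalence
-- proved here is about the return value.

-- ===== PORT A =====
-- the for-loop with break: state (ans, k); 'break' returns ans+1 immediately when k-1 = 0
def loopA : List Int → Int → Int → Int → Int
  | [], ans, _, _ => ans
  | x :: xs, ans, k, t =>
    if x ≤ k + t then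
      (if k - 1 = 0 then ans + 1 else loopA xs (ans + 1) (k - 1) t)
    else loopA xs ans k t

def solve (n : Int) (m : Int) (a : Int) (b : Int) (s : List Int) : Int :=
  let kt := if a < b then (b - a - 1, a - 1) else (a - b - 1, n - a)
  let k := kt.1
  let t := kt.2
  if k = 0 then 0
  else
    let w := PySem.List.sorted s (fun x => x) false     -- s.sort()
    -- s[::-1]: slice? with step -1 never fails (slice?_none_none_neg_one)
    loopA ((PySem.List.slice? w none none (-1)).getD []) 0 k t

-- ===== PORT B =====
-- single ascending fold; state = (ans, j) where j counts thresholds t+1..t+j unusable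
def solve_alt (n : Int) (m : Int) (a : Int) (b : Int) (s : List Int) : Int :=
  let k : Int := if a < b then b - a - 1 else a - b - 1
  let t : Int := if a < b then a - 1 else n - a
  if k = 0 then 0
  else
    ((PySem.List.sorted s (fun x => x) false).foldl
        (fun st x =>
          let j := max st.2 (x - t - 1)
          if j < k then (st.1 + 1, j + 1) else (st.1, j))
        ((0 : Int), (0 : Int))).1

-- ===== PRECONDITION & SPEC =====
-- Pre_ excludes a = b (impossible in the problem: two equal seat positions), on which A's
-- k becomes -1 and its loop counts with ever-more-negative thresholds — an accident of the
-- implementation that B's fixed-threshold matching naturally does not reproduce.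
def Pre_solve (n : Int) (m : Int) (a : Int) (b : Int) (s : List Int) : Prop := a ≠ b
instance (n : Int) (m : Int) (a : Int) (b : Int) (s : List Int) : Decidable (Pre_solve n m a b s) := by unfold Pre_solve; infer_instance
def pvWitness_solve : Int × Int × Int × Int × List Int := (6, 3, 1, 5, [2, 5, 1])

def Spec_solve (n : Int) (m : Int) (a : Int) (b : Int) (s : List Int) (out : Int) : Prop := out = solve_alt n m a b s
instance (n : Int) (m : Int) (a : Int) (b : Int) (s : List Int) (out : Int) : Decidable (Spec_solve n m a b s out) := by unfold Spec_solve; infer_instance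

-- ===== CLAIM (what is proved, stated in full; the proofs are below) =====
def Claim_equal_solve : Prop := ∀ (n : Int) (m : Int) (a : Int) (b : Int) (s : List Int), Dom_solve n m a b s → Pre_solve n m a b s → Spec_solve n m a b s (solve n m a b s)

-- ===== LEMMAS AND PROOFS =====

-- max matching between values w (ascending) and the integer thresholds lo+1 .. hi
-- (x matches th iff x ≤ th), the common reference both loops are reduced to
def Mrec : List Int → Int → Int → Int
  | [], _, _ => 0
  | x :: xs, lo, hi =>
    let lo' := max lo (x - 1)
    if lo' < hi then 1 + Mrec xs (lo' + 1) hi else 0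

theorem Mrec_zero (w : List Int) (lo hi : Int) (h : hi ≤ lo) : Mrec w lo hi = 0 := by
  cases w with
  | nil => rfl
  | cons x xs =>
    simp only [Mrec]
    have : ¬ (max lo (x - 1) < hi) := by omega
    simp [this]

-- dropping a too-large last element does not change the matching
theorem Mrec_drop (w : List Int) (y lo hi : Int) (hy : hi < y) :
    Mrec (w ++ [y]) lo hi = Mrec w lo hi := by
  induction w generalizing lo with
  | nil =>
    simp only [List.nil_append, Mrec]
    have : ¬ (max lo (y - 1) < hi) := by omega
    simp [this]
  | cons x xs ih =>
    simp only [List.cons_append, Mrec]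
    split <;> simp [ih]

-- matching a largest fitting element against the top threshold
theorem Mrec_match (w : List Int) (y lo hi : Int) (hw : ∀ z ∈ w, z ≤ y)
    (hlo : lo < hi) (hy : y ≤ hi) :
    Mrec (w ++ [y]) lo hi = 1 + Mrec w lo (hi - 1) := by
  induction w generalizing lo with
  | nil =>
    simp only [List.nil_append, Mrec]
    have : max lo (y - 1) < hi := by omega
    simp [this]
  | cons x xs ih =>
    have hx : x ≤ y := hw x (by simp)
    have hxs : ∀ z ∈ xs, z ≤ y := fun z hz => hw z (by simp [hz])
    simp only [List.cons_append, Mrec]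
    by_cases h1 : max lo (x - 1) < hi - 1
    · have h2 : max lo (x - 1) < hi := by omega
      simp only [h1, h2, if_pos]
      rw [ih _ hxs (by omega)]
    · by_cases h2 : max lo (x - 1) < hi
      · -- max lo (x-1) = hi - 1: the tail xs ++ [y] finds no room above hi-1+1 = hi
        simp only [h1, h2, if_pos]
        have : Mrec (xs ++ [y]) (max lo (x - 1) + 1) hi = 0 := Mrec_zero _ _ _ (by omega)
        simp [this]
      · -- impossible: x > hi ≥ y ≥ x
        omega

-- bridge for B's fold
theorem foldB_eq_Mrec (w : List Int) (ans j k t : Int) :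
    (w.foldl
        (fun st x =>
          let j := max st.2 (x - t - 1)
          if j < k then (st.1 + 1, j + 1) else (st.1, j))
        (ans, j)).1 = ans + Mrec w (t + j) (t + k) := by
  induction w generalizing ans j with
  | nil => simp [Mrec]
  | cons x xs ih =>
    simp only [List.foldl_cons, Mrec]
    have hmax : max (t + j) (x - 1) = t + max j (x - t - 1) := by omega
    by_cases h : max j (x - t - 1) < k
    · have hlt : max (t + j) (x - 1) < t + k := by omega
      simp only [h, if_pos, hlt]
      rw [ih]
      rw [hmax]
      ring_nf
    · have hge : ¬ (max (t + j) (x - 1) < t + k) := by omega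
      simp only [h, if_neg, hge, not_false_eq_true]
      rw [ih]
      rw [Mrec_zero xs _ _ (by omega)]

-- bridge for A's loop: on a descending list with k ≥ 1 it computes the same matching
theorem loopA_eq_Mrec (r : List Int) (ans k t : Int)
    (hr : r.Pairwise (fun a b => b ≤ a)) (hk : 1 ≤ k) :
    loopA r ans k t = ans + Mrec r.reverse t (t + k) := by
  induction r generalizing ans k with
  | nil => simp [loopA, Mrec]
  | cons y rs ih =>
    have hy : ∀ z ∈ rs, z ≤ y := (List.pairwise_cons.mp hr).1
    have hrs : rs.Pairwise (fun a b => b ≤ a) := (List.pairwise_cons.mp hr).2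
    have hy' : ∀ z ∈ rs.reverse, z ≤ y := by intro z hz; exact hy z (List.mem_reverse.mp hz)
    simp only [loopA, List.reverse_cons]
    by_cases hfit : y ≤ k + t
    · rw [Mrec_match rs.reverse y t (t + k) hy' (by omega) (by omega)]
      by_cases hk1 : k - 1 = 0
      · have : Mrec rs.reverse t (t + k - 1) = 0 := Mrec_zero _ _ _ (by omega)
        simp only [hfit, if_pos, hk1, if_pos]
        rw [this]; ring
      · have := ih (ans + 1) (k - 1) hrs (by omega)
        simp only [hfit, if_pos, hk1, if_neg, not_false_eq_true]
        rw [this]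
        have : t + (k - 1) = t + k - 1 := by ring
        rw [this]; ring
    · rw [Mrec_drop rs.reverse y t (t + k) (by omega)]
      simp only [hfit, if_neg, not_false_eq_true]
      exact ih ans k hrs hk

-- ===== VERDICT (by name: the statement is the Claim_ definition above) =====
theorem solve_spec : Claim_equal_solve := by
  intro n m a b s _ hpre
  unfold Spec_solve solve solve_alt
  simp only []
  set k := if a < b then b - a - 1 else a - b - 1 with hkdef
  set t := if a < b then a - 1 else n - a with htdef
  have hkt : (if a < b then (b - a - 1, a - 1) else (a - b - 1, n - a)) = (k, t) := by
    rw [hkdef, htdef]; split <;> rfl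
  rw [hkt]
  by_cases hk0 : k = 0
  · simp [hk0]
  · have hk1 : 1 ≤ k := by
      unfold Pre_solve at hpre
      rw [hkdef] at hk0 ⊢
      split_ifs at hk0 ⊢ <;> omega
    simp only [hk0, if_neg, not_false_eq_true]
    rw [PySem.List.slice?_none_none_neg_one]
    simp only [Option.getD_some]
    set w := PySem.List.sorted s (fun x => x) false with hw
    have hpw : w.Pairwise (fun a b => a ≤ b) := PySem.List.sorted_pairwise s (fun x => x)
    have hpwr : w.reverse.Pairwise (fun a b => b ≤ a) := by
      rw [List.pairwise_reverse]; exact hpw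
    rw [loopA_eq_Mrec w.reverse 0 k t hpwr hk1, foldB_eq_Mrec w 0 0 k t,
      List.reverse_reverse]
    norm_num
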